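-- pv_equiv track=rewrite | github.com/JonasDeipenbrock/advent2023 | 1_one/main.py | get_word_indizes
-- ===== SOURCE A (Python) =====
-- from typing import Dict
--
-- def get_word_indizes(line: str, indizes: Dict[int, str]) -> Dict[int, str]:
--     number_pairs = [["one", "1"], ["two", "2"], ["three", "3"], ["four", "4"], ["five", "5"], ["six", "6"], ["seven", "7"], ["eight", "8"], ["nine", "9"]]
--     for pair in number_pairs:
--         leftest_index = line.find(pair[0])
--         rightest_index = line.rfind(pair[0])
--         if(leftest_index == -1):
--             # skip this cause both will have no match
--             continue
--         if(leftest_index == rightest_index):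
--             indizes[leftest_index] = pair[1]
--         else:
--             indizes[leftest_index] = pair[1]
--             indizes[rightest_index] = pair[1]
--     return indizes
-- ===== SOURCE B (Python) =====
-- def get_word_indizes(line, indizes):
--     number_pairs = [("one", "1"), ("two", "2"), ("three", "3"), ("four", "4"), ("five", "5"), ("six", "6"), ("seven", "7"), ("eight", "8"), ("nine", "9")]
--     for word, digit in number_pairs:
--         hits = [i for i in range(len(line)) if line.startswith(word, i)]
--         if hits:
--             indizes[hits[0]] = digit
--             if hits[-1] != hits[0]:
--                 indizes[hits[-1]] = digit
--     return indizes
-- ===== Notes on version B (the rewrite author's own statement) =====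
-- stated objective: simpler
-- what changed: Instead of calling find and rfind (two directed searches per word), B collects all match positions of each word in one forward scan (a range comprehension with startswith) and writes the digit at the first and, if distinct, the last position.
import Mathlib
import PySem

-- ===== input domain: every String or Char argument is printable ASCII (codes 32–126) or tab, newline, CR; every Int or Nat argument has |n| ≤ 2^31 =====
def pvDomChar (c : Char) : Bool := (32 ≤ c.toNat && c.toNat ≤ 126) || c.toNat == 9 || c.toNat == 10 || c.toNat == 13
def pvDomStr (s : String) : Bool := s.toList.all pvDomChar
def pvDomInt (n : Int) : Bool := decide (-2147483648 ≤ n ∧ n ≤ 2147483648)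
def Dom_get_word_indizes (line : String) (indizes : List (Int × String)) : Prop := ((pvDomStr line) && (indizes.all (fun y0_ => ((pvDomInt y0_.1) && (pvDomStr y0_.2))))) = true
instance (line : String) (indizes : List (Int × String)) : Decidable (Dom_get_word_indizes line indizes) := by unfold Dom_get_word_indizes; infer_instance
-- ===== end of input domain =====

-- B collects all match positions of each word in one forward scan instead of A's find/rfind
-- pair of directed searches; same asymptotic cost, plainer mechanism (objective: simpler).

def pvNumberPairs : List (String × String) :=
  [("one", "1"), ("two", "2"), ("three", "3"), ("four", "4"), ("five", "5"),
   ("six", "6"), ("seven", "7"), ("eight", "8"), ("nine", "9")]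

-- ===== PORT A =====
-- loop body of A's 'for pair in number_pairs' (the dict 'indizes' is the fold state)
def pvAStep (line : String) (ind : PySem.Dict Int String) (pair : String × String) : PySem.Dict Int String :=
  let leftest_index := PySem.Str.find line pair.1
  let rightest_index := PySem.Str.rfind line pair.1
  if leftest_index = -1 then ind
  else if leftest_index = rightest_index then ind.insert leftest_index pair.2
  else (ind.insert leftest_index pair.2).insert rightest_index pair.2

def get_word_indizes (line : String) (indizes : List (Int × String)) : List (Int × String) :=
  (pvNumberPairs.foldl (pvAStep line) (PySem.Dict.mk indizes)).items

-- ===== PORT B =====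
-- loop body of B's 'for word, digit in number_pairs'; 'line.startswith(word, i)' is exact
-- as startswith on the suffix from i (0 ≤ i < len(line)); hits[0]/hits[-1] are head/getLast.
def pvBStep (line : String) (ind : PySem.Dict Int String) (pair : String × String) : PySem.Dict Int String :=
  -- range(len(line)) iterates 0,…,len-1 over the code points: List.range line.toList.length
  let hits := (List.range line.toList.length).filter
      (fun i => PySem.Chars.startswith (line.toList.drop i) pair.1.toList)
  match hits with
  | [] => ind
  | h :: t =>
    let ind' := ind.insert (h : Int) pair.2
    if ((((h :: t).getLast (by simp) : Nat) : Int) ≠ (h : Int)) then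
      ind'.insert (((h :: t).getLast (by simp) : Nat) : Int) pair.2
    else ind'

def get_word_indizes_alt (line : String) (indizes : List (Int × String)) : List (Int × String) :=
  (pvNumberPairs.foldl (pvBStep line) (PySem.Dict.mk indizes)).items

-- ===== PRECONDITION & SPEC =====
def Spec_get_word_indizes (line : String) (indizes : List (Int × String)) (out : List (Int × String)) : Prop := out = get_word_indizes_alt line indizes
instance (line : String) (indizes : List (Int × String)) (out : List (Int × String)) : Decidable (Spec_get_word_indizes line indizes out) := by unfold Spec_get_word_indizes; infer_instance

-- ===== CLAIM (what is proved, stated in full; the proofs are below) =====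
def Claim_equal_get_word_indizes : Prop := ∀ (line : String) (indizes : List (Int × String)), Dom_get_word_indizes line indizes → Spec_get_word_indizes line indizes (get_word_indizes line indizes)

-- ===== LEMMAS AND PROOFS =====

-- Chars.find.go scans forward: its result is determined by the first match position.
theorem pvFindGoEq (sub : List Char) (hsub : sub ≠ []) :
    ∀ (s : List Char) (k : Nat),
      PySem.Chars.find.go sub s k =
        match ((List.range s.length).filter (fun i => sub.isPrefixOf (s.drop i))).head? with
        | none => -1
        | some m => ((k + m : Nat) : Int) := by
  intro s
  induction s with
  | nil =>
      intro k
      simp [PySem.Chars.find.go, List.isEmpty_iff, hsub]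
  | cons c t ih =>
      intro k
      have hfil : ((List.range (c :: t).length).filter (fun i => sub.isPrefixOf ((c :: t).drop i))) =
          (if sub.isPrefixOf (c :: t) then
            0 :: ((List.range t.length).filter (fun i => sub.isPrefixOf (t.drop i))).map Nat.succ
          else ((List.range t.length).filter (fun i => sub.isPrefixOf (t.drop i))).map Nat.succ) := by
        rw [List.length_cons, List.range_succ_eq_map, List.filter_cons, List.filter_map]
        have hcomp : ((fun i => sub.isPrefixOf ((c :: t).drop i)) ∘ Nat.succ) =
            (fun i => sub.isPrefixOf (t.drop i)) := by
          funext i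
          simp [Function.comp, List.drop_succ_cons]
        rw [hcomp]
        cases hp : sub.isPrefixOf (c :: t) <;> simp [hp]
      rw [PySem.Chars.find.go, hfil]
      by_cases hp : sub.isPrefixOf (c :: t) = true
      · simp [hp]
      · simp only [hp, Bool.false_eq_true, if_false]
        rw [ih (k + 1), List.head?_map]
        cases hh : ((List.range t.length).filter (fun i => sub.isPrefixOf (t.drop i))).head? with
        | none => simp
        | some m =>
            simp only [Option.map_some]
            push_cast
            ring

-- Chars.rfind.go scans backward from j: its result is the last match position ≤ j.
theorem pvRfindGoEq (s sub : List Char) :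
    ∀ (j : Nat),
      PySem.Chars.rfind.go s sub j =
        match ((List.range (j + 1)).filter (fun i => sub.isPrefixOf (s.drop i))).getLast? with
        | none => -1
        | some m => (m : Int) := by
  intro j
  induction j with
  | zero =>
      by_cases hp : sub.isPrefixOf s = true
      · simp [PySem.Chars.rfind.go, hp, List.range_succ]
      · simp [PySem.Chars.rfind.go, hp, List.range_succ]
  | succ j ih =>
      rw [PySem.Chars.rfind.go]
      by_cases hp : sub.isPrefixOf (s.drop (j + 1)) = true
      · simp [hp, List.range_succ, List.filter_append, List.getLast?_append]
      · simp only [hp, Bool.false_eq_true, if_false]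
        rw [ih]
        simp [List.range_succ, List.filter_append, List.getLast?_append, hp]

-- For a nonempty word, position s.length can never match, so rfind's 0..len range
-- filters to the same hit list as B's range over 0..len-1.
theorem pvFilterRangeSucc (s sub : List Char) (hsub : sub ≠ []) :
    ((List.range (s.length + 1)).filter (fun i => sub.isPrefixOf (s.drop i))) =
      ((List.range s.length).filter (fun i => sub.isPrefixOf (s.drop i))) := by
  have hlast : sub.isPrefixOf (s.drop s.length) = false := by
    rw [List.drop_length]
    cases sub with
    | nil => exact absurd rfl hsub
    | cons a l => rfl
  simp [List.range_succ, List.filter_append, hsub]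

-- The two loop bodies agree for every nonempty word.
theorem pvStepEq (line : String) (pair : String × String) (hw : pair.1.toList ≠ [])
    (ind : PySem.Dict Int String) :
    pvAStep line ind pair = pvBStep line ind pair := by
  unfold pvAStep pvBStep
  have hfind : PySem.Str.find line pair.1 = PySem.Chars.find.go pair.1.toList line.toList 0 := by
    simp [PySem.Str.find_eq, PySem.Chars.find]
  have hrfind : PySem.Str.rfind line pair.1 =
      PySem.Chars.rfind.go line.toList pair.1.toList line.toList.length := by
    simp [PySem.Str.rfind_eq, PySem.Chars.rfind]
  rw [hfind, hrfind, pvFindGoEq pair.1.toList hw line.toList 0,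
    pvRfindGoEq line.toList pair.1.toList line.toList.length,
    pvFilterRangeSucc line.toList pair.1.toList hw]
  simp only [PySem.Chars.startswith]
  cases hh : ((List.range line.toList.length).filter
      (fun i => pair.1.toList.isPrefixOf (line.toList.drop i))) with
  | nil => simp
  | cons h t =>
      simp only [List.head?_cons, List.getLast?_eq_some_getLast (l := h :: t) (by simp),
        Nat.zero_add]
      have hne : ¬((h : Int) = -1) := by omega
      by_cases hl : (h :: t).getLast (by simp) = h
      · simp [hl, hne]
      · have hlc : ¬((h : Int) = (((h :: t).getLast (by simp) : Nat) : Int)) := by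
          intro e
          exact hl (by exact_mod_cast e.symm)
        have hlc' : ¬((((h :: t).getLast (by simp) : Nat) : Int) = (h : Int)) :=
          fun e => hlc e.symm
        simp [hne, hlc, hlc']

-- ===== VERDICT (by name: the statement is the Claim_ definition above) =====
theorem get_word_indizes_spec : Claim_equal_get_word_indizes := by
  intro line indizes _
  unfold Spec_get_word_indizes get_word_indizes get_word_indizes_alt
  congr 1
  apply PySem.List.foldl_congr_mem
  intro acc pair hmem
  apply pvStepEq
  fin_cases hmem <;> decide
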